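-- pv_equiv track=rewrite | github.com/elevanaltd/hestai-mcp-server | utils/file_context_processor.py | _prioritize_files
-- ===== SOURCE A (Python) =====
-- def _prioritize_files(file_paths: list[str]) -> list[str]:
--     """
--     Intelligently prioritize files based on importance.
--
--     Args:
--         file_paths: List of file paths to prioritize
--
--     Returns:
--         Reordered list with higher priority files first
--     """
--     priority_scores = []
--
--     for path in file_paths:
--         score = 0
--         path_lower = path.lower()
--
--         # Higher priority for certain file types
--         if "main" in path_lower or "app" in path_lower or "index" in path_lower:
--             score += 10
--         if "critical" in path_lower or "core" in path_lower:
--             score += 8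
--         if "config" in path_lower or "setup" in path_lower:
--             score += 6
--         if "test" in path_lower:
--             score += 4
--         if "util" in path_lower or "helper" in path_lower:
--             score += 2
--         if "deprecated" in path_lower or "legacy" in path_lower or "old" in path_lower:
--             score -= 5
--
--         priority_scores.append((score, path))
--
--     # Sort by priority (higher scores first)
--     priority_scores.sort(key=lambda x: -x[0])
--
--     return [path for _, path in priority_scores]
-- ===== SOURCE B (Python) =====
-- _RULES = [
--     (("main", "app", "index"), 10),
--     (("critical", "core"), 8),
--     (("config", "setup"), 6),
--     (("test",), 4),
--     (("util", "helper"), 2),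
--     (("deprecated", "legacy", "old"), -5),
-- ]
--
--
-- def _score(path: str) -> int:
--     low = path.lower()
--     return sum(pts for subs, pts in _RULES if any(s in low for s in subs))
--
--
-- def _prioritize_files(file_paths: list[str]) -> list[str]:
--     buckets: dict[int, list[str]] = {}
--     for path in file_paths:
--         buckets.setdefault(_score(path), []).append(path)
--     out: list[str] = []
--     for s in sorted(buckets, reverse=True):
--         out += buckets[s]
--     return out
-- ===== Notes on version B (the rewrite author's own statement) =====
-- stated objective: alternative
-- what changed: Replaces the build-(score,path)-tuples-then-comparison-sort pipeline by a table-driven scorer plus a dict that groups paths by score in input order, emitting the groups over the distinct scores in descending order.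
import Mathlib
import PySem

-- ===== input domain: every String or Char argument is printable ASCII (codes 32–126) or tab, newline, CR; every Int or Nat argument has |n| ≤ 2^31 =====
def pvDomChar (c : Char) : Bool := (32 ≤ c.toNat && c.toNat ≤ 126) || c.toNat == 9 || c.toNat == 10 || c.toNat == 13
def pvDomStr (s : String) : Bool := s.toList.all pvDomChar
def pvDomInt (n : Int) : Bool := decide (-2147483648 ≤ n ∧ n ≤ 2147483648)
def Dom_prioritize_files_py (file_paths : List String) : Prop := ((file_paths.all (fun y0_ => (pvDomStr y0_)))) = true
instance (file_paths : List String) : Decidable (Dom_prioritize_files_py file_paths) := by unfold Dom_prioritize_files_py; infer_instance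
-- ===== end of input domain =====

-- B replaces A's build-(score,path)-tuples-then-stable-comparison-sort by a table-driven scorer
-- plus a dict grouping paths by score in input order, concatenating the groups over the distinct
-- scores in descending order (alternative decomposition, same result).

-- ===== PORT A =====
-- the score computation of A's loop body, verbatim (helper name for readability)
def pvScoreA (path : String) : Int :=
  let path_lower := PySem.Str.lower path
  let score : Int := 0
  let score := if PySem.Str.isIn "main" path_lower || PySem.Str.isIn "app" path_lower || PySem.Str.isIn "index" path_lower then score + 10 else score
  let score := if PySem.Str.isIn "critical" path_lower || PySem.Str.isIn "core" path_lower then score + 8 else score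
  let score := if PySem.Str.isIn "config" path_lower || PySem.Str.isIn "setup" path_lower then score + 6 else score
  let score := if PySem.Str.isIn "test" path_lower then score + 4 else score
  let score := if PySem.Str.isIn "util" path_lower || PySem.Str.isIn "helper" path_lower then score + 2 else score
  let score := if PySem.Str.isIn "deprecated" path_lower || PySem.Str.isIn "legacy" path_lower || PySem.Str.isIn "old" path_lower then score - 5 else score
  score

def prioritize_files_py (file_paths : List String) : List String :=
  let priority_scores : List (Int × String) :=
    file_paths.foldl (fun acc path => acc ++ [(pvScoreA path, path)]) []
  let sortedScores := PySem.List.sorted priority_scores (fun x => -x.1) false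
  sortedScores.map (fun x => x.2)

-- ===== PORT B =====
def pvRules : List (List String × Int) :=
  [(["main", "app", "index"], 10),
   (["critical", "core"], 8),
   (["config", "setup"], 6),
   (["test"], 4),
   (["util", "helper"], 2),
   (["deprecated", "legacy", "old"], -5)]

def pvScoreB (path : String) : Int :=
  let low := PySem.Str.lower path
  ((pvRules.filter (fun r => r.1.any (fun s => PySem.Str.isIn s low))).map (fun r => r.2)).sum

def prioritize_files_py_alt (file_paths : List String) : List String :=
  let buckets : PySem.Dict Int (List String) :=
    file_paths.foldl (fun d path => d.modify (pvScoreB path) [] (fun cur => cur ++ [path])) PySem.Dict.empty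
  (PySem.List.sorted buckets.keys (fun s => s) true).foldl (fun out s => out ++ buckets.getD s []) []

-- ===== PRECONDITION & SPEC =====
def Spec_prioritize_files_py (file_paths : List String) (out : List String) : Prop := out = prioritize_files_py_alt file_paths
instance (file_paths : List String) (out : List String) : Decidable (Spec_prioritize_files_py file_paths out) := by unfold Spec_prioritize_files_py; infer_instance

-- ===== CLAIM (what is proved, stated in full; the proofs are below) =====
def Claim_equal_prioritize_files_py : Prop := ∀ (file_paths : List String), Dom_prioritize_files_py file_paths → Spec_prioritize_files_py file_paths (prioritize_files_py file_paths)

-- ===== LEMMAS AND PROOFS =====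

-- the two score computations agree
set_option maxHeartbeats 1000000 in
theorem pvScore_eq (p : String) : pvScoreA p = pvScoreB p := by
  simp only [pvScoreA, pvScoreB, pvRules, List.any_cons, List.any_nil, Bool.or_false,
    List.filter_cons, List.filter_nil]
  split_ifs <;> simp_all

-- accumulate-append loop is a map
theorem pvFoldl_append_map {α β : Type} (f : α → β) :
    ∀ (l : List α) (acc : List β),
      l.foldl (fun acc x => acc ++ [f x]) acc = acc ++ l.map f := by
  intro l
  induction l with
  | nil => simp
  | cons x t ih => intro acc; simp [ih]

-- inserting x into a key-sorted list appends it to its key group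
theorem pvInsertBy_filter {α : Type} (key : α → Int) (x : α) (k : Int) :
    ∀ (ys : List α), ys.Pairwise (fun a b => key a ≤ key b) →
      (PySem.List.insertBy (fun a b => decide (key a < key b)) x ys).filter (fun z => key z == k)
        = ys.filter (fun z => key z == k) ++ if key x == k then [x] else [] := by
  intro ys
  induction ys with
  | nil =>
    intro _
    by_cases hk : (key x == k) = true <;> simp [PySem.List.insertBy, List.filter, hk]
  | cons y t ih =>
    intro hp
    rw [List.pairwise_cons] at hp
    simp only [PySem.List.insertBy]
    by_cases hlt : key x < key y
    · rw [if_pos (by simpa using hlt)]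
      by_cases hk : (key x == k) = true
      · have hnone : (y :: t).filter (fun z => key z == k) = [] := by
          rw [List.filter_eq_nil_iff]
          intro z hz
          have hyz : key y ≤ key z := by
            rcases List.mem_cons.mp hz with hz | hz
            · exact le_of_eq (by rw [hz])
            · exact hp.1 z hz
          simp only [beq_iff_eq] at hk ⊢
          omega
        rw [List.filter_cons, if_pos hk, hnone]
        simp [hk]
      · rw [List.filter_cons, if_neg hk]
        simp [hk]
    · rw [if_neg (by simpa using hlt)]
      rw [List.filter_cons, List.filter_cons, ih hp.2]
      by_cases hy : (key y == k) = true
      · rw [if_pos hy, if_pos hy]; simp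
      · rw [if_neg hy, if_neg hy]

-- stability: sorting does not change the subsequence of each key class
theorem pvSorted_filter {α : Type} (key : α → Int) (l : List α) (k : Int) :
    (PySem.List.sorted l key false).filter (fun z => key z == k) = l.filter (fun z => key z == k) := by
  induction l using List.reverseRecOn with
  | nil => rfl
  | append_singleton l x ih =>
    rw [PySem.List.sorted_eq_foldl_insertBy, List.foldl_append, List.foldl_cons, List.foldl_nil,
      ← PySem.List.sorted_eq_foldl_insertBy,
      pvInsertBy_filter key x k _ (PySem.List.sorted_pairwise l key), ih, List.filter_append]
    by_cases hk : (key x == k) = true <;> simp [List.filter, hk]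

-- a key-sorted list is determined by its key classes
theorem pvSorted_unique {α : Type} (key : α → Int) :
    ∀ (ys zs : List α), ys.Pairwise (fun a b => key a ≤ key b) → zs.Pairwise (fun a b => key a ≤ key b) →
      (∀ k, ys.filter (fun z => key z == k) = zs.filter (fun z => key z == k)) → ys = zs := by
  intro ys
  induction ys with
  | nil =>
    intro zs _ _ hfil
    cases zs with
    | nil => rfl
    | cons b zs' =>
      have := hfil (key b)
      simp at this
  | cons a ys' ih =>
    intro zs hys hzs hfil
    cases zs with
    | nil =>
      have := hfil (key a)
      simp at this
    | cons b zs' =>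
      rw [List.pairwise_cons] at hys hzs
      have hkeq : key a = key b := by
        by_contra hne
        rcases lt_or_gt_of_ne hne with hlt | hgt
        · -- key a < key b : the class of key a is inhabited on the left, empty on the right
          have hbz : ((b :: zs').filter (fun z => key z == key a)) = [] := by
            rw [List.filter_eq_nil_iff]
            intro z hz
            have hbl : key b ≤ key z := by
              rcases List.mem_cons.mp hz with hz | hz
              · exact le_of_eq (by rw [hz])
              · exact hzs.1 z hz
            simp only [beq_iff_eq]
            omega
          have hmem : a ∈ (a :: ys').filter (fun z => key z == key a) :=
            List.mem_filter.mpr ⟨by simp, by simp⟩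
          rw [hfil (key a), hbz] at hmem
          simp at hmem
        · have haz : ((a :: ys').filter (fun z => key z == key b)) = [] := by
            rw [List.filter_eq_nil_iff]
            intro z hz
            have hal : key a ≤ key z := by
              rcases List.mem_cons.mp hz with hz | hz
              · exact le_of_eq (by rw [hz])
              · exact hys.1 z hz
            simp only [beq_iff_eq]
            omega
          have hmem : b ∈ (b :: zs').filter (fun z => key z == key b) :=
            List.mem_filter.mpr ⟨by simp, by simp⟩
          rw [← hfil (key b), haz] at hmem
          simp at hmem
      have hhead := hfil (key a)
      rw [List.filter_cons, List.filter_cons, if_pos (by simp), if_pos (by simp [hkeq])] at hhead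
      injection hhead with hab htail
      subst hab
      congr 1
      apply ih zs' hys.2 hzs.2
      intro k
      have h := hfil k
      rw [List.filter_cons, List.filter_cons] at h
      by_cases hk : (key a == k) = true
      · rw [if_pos hk, if_pos hk] at h
        injection h
      · rw [if_neg hk, if_neg hk] at h
        exact h

-- pairwise (descending key) over the grouped concatenation
theorem pvFlat_pairwise (pairs : List (Int × String)) :
    ∀ (ks : List Int), ks.Pairwise (fun a b => b ≤ a) →
      (ks.flatMap (fun s => pairs.filter (fun q => q.1 == s))).Pairwise
        (fun a b => -a.1 ≤ -b.1) := by
  intro ks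
  induction ks with
  | nil => intro _; simp
  | cons s ks ih =>
    intro hp
    rw [List.pairwise_cons] at hp
    simp only [List.flatMap_cons]
    rw [List.pairwise_append]
    refine ⟨?_, ih hp.2, ?_⟩
    · apply List.pairwise_of_forall_mem_list
      intro a ha b hb
      have ha' := (List.mem_filter.mp ha).2
      have hb' := (List.mem_filter.mp hb).2
      simp only [beq_iff_eq] at ha' hb'
      omega
    · intro a ha b hb
      have ha' := (List.mem_filter.mp ha).2
      rcases List.mem_flatMap.mp hb with ⟨s', hs', hb'⟩
      have hb'' := (List.mem_filter.mp hb').2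
      have hle := hp.1 s' hs'
      simp only [beq_iff_eq] at ha' hb''
      omega

-- filtering the grouped concatenation by one key recovers that group
theorem pvFlat_filter (pairs : List (Int × String)) (c : Int) :
    ∀ (ks : List Int), ks.Nodup →
      (ks.flatMap (fun s => pairs.filter (fun q => q.1 == s))).filter (fun q => q.1 == c)
        = if c ∈ ks then pairs.filter (fun q => q.1 == c) else [] := by
  intro ks
  induction ks with
  | nil => intro _; simp
  | cons s ks ih =>
    intro hnd
    rw [List.nodup_cons] at hnd
    simp only [List.flatMap_cons, List.filter_append, ih hnd.2]
    by_cases hsc : s = c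
    · subst hsc
      have h1 : (pairs.filter (fun q => q.1 == s)).filter (fun q => q.1 == s)
          = pairs.filter (fun q => q.1 == s) := by
        rw [List.filter_filter]
        apply List.filter_congr
        intro q _; simp
      have h2 : s ∉ ks := hnd.1
      simp [h1, h2]
    · have h1 : (pairs.filter (fun q => q.1 == s)).filter (fun q => q.1 == c) = [] := by
        rw [List.filter_eq_nil_iff]
        intro q hq
        have := (List.mem_filter.mp hq).2
        simp only [beq_iff_eq] at this ⊢
        omega
      by_cases hc : c ∈ ks <;> simp [h1, hc, Ne.symm hsc]

-- the central fact: A's stable sort of the pairs equals B's grouped concatenation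
theorem pvSorted_eq_flat (file_paths : List String) :
    PySem.List.sorted (file_paths.map (fun p => (pvScoreB p, p))) (fun x => -x.1) false
      = (PySem.List.sorted (PySem.Set.ofList (file_paths.map pvScoreB)) (fun s => s) true).flatMap
          (fun s => (file_paths.map (fun p => (pvScoreB p, p))).filter (fun q => q.1 == s)) := by
  set pairs := file_paths.map (fun p => (pvScoreB p, p)) with hpairs
  set ks := PySem.List.sorted (PySem.Set.ofList (file_paths.map pvScoreB)) (fun s => s) true with hks
  have hksnd : ks.Nodup := by
    have hperm := PySem.List.sorted_perm (PySem.Set.ofList (file_paths.map pvScoreB)) (fun s => s) true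
    exact hperm.symm.nodup (PySem.Set.nodup_ofList (file_paths.map pvScoreB))
  have hksmem : ∀ c, c ∈ ks ↔ c ∈ file_paths.map pvScoreB := by
    intro c
    rw [hks, PySem.List.mem_sorted, PySem.Set.mem_ofList]
  apply pvSorted_unique (fun x => -x.1)
  · exact PySem.List.sorted_pairwise pairs (fun x => -x.1)
  · exact pvFlat_pairwise pairs ks (PySem.List.sorted_pairwise_rev _ (fun s => s))
  · intro k
    rw [pvSorted_filter]
    have hpred : ∀ (l : List (Int × String)),
        l.filter (fun z => -z.1 == k) = l.filter (fun q => q.1 == -k) := by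
      intro l
      apply List.filter_congr
      intro q _
      rw [Bool.eq_iff_iff]
      simp only [beq_iff_eq]
      constructor <;> (intro h; omega)
    rw [hpred, hpred, pvFlat_filter pairs (-k) ks hksnd]
    by_cases hc : (-k) ∈ ks
    · simp [hc]
    · have : pairs.filter (fun q => q.1 == -k) = [] := by
        rw [List.filter_eq_nil_iff]
        intro q hq
        rcases List.mem_map.mp (hpairs ▸ hq) with ⟨p, hp, hq'⟩
        have : pvScoreB p ≠ -k := by
          intro he
          exact hc ((hksmem (-k)).mpr (List.mem_map.mpr ⟨p, hp, he⟩))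
        simp only [← hq', beq_iff_eq]
        exact this
      simp [hc, this]

-- ===== VERDICT (by name: the statement is the Claim_ definition above) =====
theorem prioritize_files_py_spec : Claim_equal_prioritize_files_py := by
  unfold Claim_equal_prioritize_files_py
  intro file_paths _
  unfold Spec_prioritize_files_py prioritize_files_py prioritize_files_py_alt
  simp only [pvFoldl_append_map, List.nil_append, pvScore_eq]
  -- rewrite B's dict fold into the pair form
  have hfold : file_paths.foldl (fun d path => d.modify (pvScoreB path) [] (fun cur => cur ++ [path])) PySem.Dict.empty
      = (file_paths.map (fun p => (pvScoreB p, p))).foldl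
          (fun d q => d.modify q.1 [] (fun cur => cur ++ [q.2])) PySem.Dict.empty := by
    rw [List.foldl_map]
  have hkeys : (file_paths.foldl (fun d path => d.modify (pvScoreB path) [] (fun cur => cur ++ [path])) PySem.Dict.empty).keys
      = PySem.Set.ofList (file_paths.map pvScoreB) := by
    rw [PySem.Dict.keys_foldl_modify_key file_paths pvScoreB [] (fun _ path => (fun cur => cur ++ [path]))]
    simp [PySem.Set.update_nil_left]
  have hgetD : ∀ s, (file_paths.foldl (fun d path => d.modify (pvScoreB path) [] (fun cur => cur ++ [path])) PySem.Dict.empty).getD s []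
      = ((file_paths.map (fun p => (pvScoreB p, p))).filter (fun q => q.1 == s)).map (fun q => q.2) := by
    intro s
    rw [hfold, PySem.Dict.getD_foldl_modify_append]
    simp
  rw [hkeys]
  simp only [hgetD]
  rw [PySem.List.foldl_append_eq_flatMap]
  simp only [List.nil_append]
  rw [← List.map_flatMap, ← pvSorted_eq_flat]
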